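-- pv_equiv track=rewrite | github.com/stardust7700/ComfyUI | tests/isolation/singleton_boundary_helpers.py | matching_modules
-- ===== SOURCE A (Python) =====
-- def matching_modules(prefixes: tuple[str, ...], modules: set[str]) -> list[str]:
--     return sorted(
--         module_name
--         for module_name in modules
--         if any(
--             module_name == prefix or module_name.startswith(f"{prefix}.")
--             for prefix in prefixes
--         )
--     )
-- ===== SOURCE B (Python) =====
-- def matching_modules(prefixes, modules):
--     # Invert the scan: instead of testing each module against every prefix,
--     # hash the prefixes once and, per module, enumerate the module's own
--     # dot-cut ancestors ("a", "a.b", ..., and the module itself) and look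
--     # each up in the hash set.  Sort first, then filter (stable under filter).
--     prefix_set = set(prefixes)
--     result = []
--     for module_name in sorted(modules):
--         ancestors = [module_name[:i] for i, ch in enumerate(module_name) if ch == '.']
--         ancestors.append(module_name)
--         if any(a in prefix_set for a in ancestors):
--             result.append(module_name)
--     return result
-- ===== Notes on version B (the rewrite author's own statement) =====
-- stated objective: faster
-- what changed: B replaces A's per-module any()-scan over all prefixes with a hash set of the prefixes built once plus, per module, a lookup of each of the module's own dot-cut ancestors (m[:i] at every '.', and m itself), filtering after sorting instead of sorting the filtered list.
import Mathlib
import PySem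

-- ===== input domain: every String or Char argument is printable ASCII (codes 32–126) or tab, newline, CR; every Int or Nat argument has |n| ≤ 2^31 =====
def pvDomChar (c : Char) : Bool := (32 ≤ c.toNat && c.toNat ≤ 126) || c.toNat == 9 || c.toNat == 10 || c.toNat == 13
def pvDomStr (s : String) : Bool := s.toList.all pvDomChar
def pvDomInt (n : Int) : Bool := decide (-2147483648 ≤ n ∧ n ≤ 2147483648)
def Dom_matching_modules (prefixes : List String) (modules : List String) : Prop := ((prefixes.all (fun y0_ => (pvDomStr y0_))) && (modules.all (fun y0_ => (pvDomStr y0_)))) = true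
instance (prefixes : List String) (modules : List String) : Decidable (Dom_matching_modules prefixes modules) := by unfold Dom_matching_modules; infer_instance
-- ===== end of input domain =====

-- B inverts the scan: it hashes the prefixes into a set once and, per module, looks up the
-- module's own dot-cut ancestors, instead of A's per-module any()-scan over all prefixes.

-- ===== PORT A =====
def matching_modules (prefixes : List String) (modules : List String) : List String :=
  PySem.List.sorted
    (modules.filter (fun module_name =>
      prefixes.any (fun pfx =>
        module_name == pfx || PySem.Str.startswith module_name (pfx ++ "."))))
    (fun x => x) false

-- ===== PORT B =====
-- the list comprehension over enumerate(module_name) plus the append of module_name itself;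
-- module_name[:i] with 0 ≤ i is exactly List.take i.toNat on the char list
def mm_ancestors (module_name : String) : List String :=
  ((PySem.List.enumerate module_name.toList).filterMap
     (fun ic => if ic.2 == '.' then some (String.ofList (module_name.toList.take ic.1.toNat)) else none))
  ++ [module_name]

def matching_modules_alt (prefixes : List String) (modules : List String) : List String :=
  let prefix_set : PySem.Set String := PySem.Set.ofList prefixes
  (PySem.List.sorted modules (fun x => x) false).filter
    (fun module_name =>
      (mm_ancestors module_name).any (fun a => PySem.Set.contains prefix_set a))

-- ===== PRECONDITION & SPEC =====
def Spec_matching_modules (prefixes : List String) (modules : List String) (out : List String) : Prop := out = matching_modules_alt prefixes modules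
instance (prefixes : List String) (modules : List String) (out : List String) : Decidable (Spec_matching_modules prefixes modules out) := by unfold Spec_matching_modules; infer_instance

-- ===== CLAIM (what is proved, stated in full; the proofs are below) =====
def Claim_equal_matching_modules : Prop := ∀ (prefixes : List String) (modules : List String), Dom_matching_modules prefixes modules → Spec_matching_modules prefixes modules (matching_modules prefixes modules)

-- ===== LEMMAS AND PROOFS =====

-- startswith m (p ++ ".") says exactly: p is a take at a dot position of m
theorem mm_sw_iff (m p : String) :
    PySem.Str.startswith m (p ++ ".") = true ↔
      ∃ k, ∃ h : k < m.toList.length, m.toList[k] = '.' ∧ p = String.ofList (m.toList.take k) := by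
  rw [PySem.Str.startswith_eq, String.toList_append]
  show PySem.Chars.startswith m.toList (p.toList ++ ['.']) = true ↔ _
  rw [PySem.Chars.startswith_iff]
  constructor
  · rintro ⟨t, ht⟩
    have ht' : p.toList ++ '.' :: t = m.toList := by simpa using ht
    refine ⟨p.toList.length, ?_, ?_, ?_⟩
    · rw [← ht']; simp
    · rw [List.getElem_of_eq ht'.symm]; simp
    · rw [← ht', List.take_left]; simp
  · rintro ⟨k, h, hdot, hp⟩
    have hpl : p.toList = m.toList.take k := by rw [hp]; simp
    have htake : m.toList.take (k + 1) = m.toList.take k ++ [m.toList[k]] := by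
      rw [List.take_add_one]; simp [List.getElem?_eq_getElem h]
    have hc : p.toList ++ ['.'] = m.toList.take (k + 1) := by rw [htake, hpl, hdot]
    rw [hc]; exact List.take_prefix _ _

-- membership in B's ancestor list is exactly A's match test
theorem mem_mm_ancestors (m p : String) :
    p ∈ mm_ancestors m ↔ (m == p || PySem.Str.startswith m (p ++ ".")) = true := by
  rw [Bool.or_eq_true, beq_iff_eq, mm_sw_iff]
  unfold mm_ancestors
  rw [List.mem_append, List.mem_filterMap]
  constructor
  · rintro (⟨ic, hic, hf⟩ | hm)
    · obtain ⟨k, hk, rfl⟩ := (PySem.List.mem_enumerate_iff _ _ _).1 hic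
      by_cases hdot : m.toList[k] == '.'
      · rw [if_pos hdot, Option.some_inj] at hf
        refine Or.inr ⟨k, hk, beq_iff_eq.1 hdot, ?_⟩
        rw [← hf]; norm_num
      · rw [if_neg hdot] at hf; exact absurd hf (by simp)
    · have hm' : p = m := by simpa using hm
      exact Or.inl hm'.symm
  · rintro (rfl | ⟨k, hk, hdot, hp⟩)
    · exact Or.inr (by simp)
    · refine Or.inl ⟨(0 + (k : Int), m.toList[k]), (PySem.List.mem_enumerate_iff _ _ _).2 ⟨k, hk, rfl⟩, ?_⟩
      rw [if_pos (by simp [hdot])]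
      norm_num [hp]

-- the two filter predicates agree
theorem mm_pred_eq (prefixes : List String) (m : String) :
    ((mm_ancestors m).any (fun a => PySem.Set.contains (PySem.Set.ofList prefixes) a))
      = prefixes.any (fun pfx => m == pfx || PySem.Str.startswith m (pfx ++ ".")) := by
  rw [Bool.eq_iff_iff]
  simp only [List.any_eq_true, PySem.Set.contains_iff, PySem.Set.mem_ofList, mem_mm_ancestors]
  tauto

-- sorting commutes with filtering (identity key)
theorem mm_sorted_filter (xs : List String) (q : String → Bool) :
    PySem.List.sorted (xs.filter q) (fun x => x) false
      = (PySem.List.sorted xs (fun x => x) false).filter q := by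
  apply PySem.List.sorted_id_eq_of_perm_of_pairwise
  · exact (PySem.List.sorted_perm xs (fun x => x) false).filter q
  · exact List.Pairwise.sublist List.filter_sublist (PySem.List.sorted_pairwise xs (fun x => x))

-- ===== VERDICT (by name: the statement is the Claim_ definition above) =====
theorem matching_modules_spec : Claim_equal_matching_modules := by
  intro prefixes modules _hDom
  unfold Spec_matching_modules matching_modules matching_modules_alt
  rw [mm_sorted_filter]
  exact List.filter_congr (fun m _ => (mm_pred_eq prefixes m).symm)
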